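/- GENERATED by mk_final_copies.py from the proof of the farm's unit `setup_free` (farm:setup_free.1: Proof.lean) as the
   re-elaboration sweep compiled it — do not edit. -/
import Asan.CheckWalk
import Vorbis.Spec.Units.setup_free

open X86 X86.User Asan Vorbis

set_option maxRecDepth 4000
set_option maxHeartbeats 4000000

/-- `setup_free(f, q)` satisfies its contract: two pushes, one checked 8-byte load of `f->alloc.alloc_buffer` (`f + 112`, inside
the live `*f`), then either the immediate return (0x10751c) or the call of `free` (a contract call, `ShadowPre` only) and the same
epilogue. Nothing is written but the function's own stack; no shadow byte is written. -/
theorem Vorbis.Spec.Worked.setup_free_ok : Vorbis.Spec.setup_free.Statement := by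
  intro Lay hLay μ hμ u₀ hcode hload8 hfree others frames u ret he hpre
  v_entry he
  obtain ⟨hsh, hobj⟩ := hpre
  -- the callee's contract, instantiated so that the walker finds it
  have hfree' := hfree others frames
  -- where `*f` is: one arithmetic fact (inside the data space, off the text, off this function's stack)
  have hsp := hsh.rsp
  have hwhere := hobj.where_ hsh.inv hsh.offText (by u_omega)
  u_walk hcode [hμ.vendor] span [Vorbis.L.textLo, Vorbis.L.textHi] side (v_side)
  case check_107510 =>
    -- 0x107510, stb_vorbis_fixed.c:978: the check of the load of `f->alloc.alloc_buffer`: `[f + 112, f + 120)` lies inside `*f`;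
    -- the three stack stores so far did not touch the shadow
    have hun : ShadowUntouched u.mem s_107510.mem := by v_untouched
    exact hobj.accSmall hsh.inv hun _ 8 (by decide) (by u_omega) (by u_omega)
  case call_inv =>
    -- 0x107526, stb_vorbis_fixed.c:979: DF and the MXCSR masks at the entry of `free`
    v_inv
  case pre_107526 =>
    -- the precondition of `free`: the shadow clause only
    show ShadowPre others frames s_107526
    refine hsh.callee ?_ ?_ ?_ ?_
    · v_untouched
    · rw [w_rsp]
      u_omega
    · rw [w_rsp]
      u_omega
    · rw [w_rsp]
      u_omega
  · -- 0x10752b: after the return of `free`: `jmp 10751c`, the epilogue, `ret`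
    v_after_call w_rsp_107526 w_mem_107526
    have hs0 : UInt64.ofNat (s_107526r.mem.readLE (u.reg .rsp) 8) = ret := by
      u_frame he_retAddr
    have hp1 : UInt64.ofNat (s_107526.mem.readLE (u.reg .rsp - 8) 8) = u.reg .rbp := by
      u_resolve
    have hp2 : UInt64.ofNat (s_107526.mem.readLE (u.reg .rsp - 16) 8) = u.reg .rbx := by
      u_resolve
    rw [w_mem_107526] at hp1 hp2
    have hs1 : UInt64.ofNat (s_107526r.mem.readLE (u.reg .rsp - 8) 8) = u.reg .rbp := by
      u_frame hp1
    have hs2 : UInt64.ofNat (s_107526r.mem.readLE (u.reg .rsp - 16) 8) = u.reg .rbx := by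
      u_frame hp2
    u_walk hcode [hμ.vendor] span [Vorbis.L.textLo, Vorbis.L.textHi] side (v_side)
    refine ReachVia.done ?_
    v_returned
    show ShadowUntouched u.mem s_107522.mem
    v_untouched
  · -- 0x10751c, stb_vorbis_fixed.c:980: `alloc_buffer ≠ 0`: the epilogue, `ret`
    refine ReachVia.done ?_
    v_returned
    show ShadowUntouched u.mem s_107522.mem
    v_untouched
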